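-- pv_equiv track=rewrite | github.com/rlatmd0829/algorithm | 백준문제/동빈나_이코테/실전문제/식스샵_03_택배.py | solution
-- ===== SOURCE A (Python) =====
-- def solution(n):
--     answer = 0
--     while n>0:
--         if n%5 == 0:
--             answer = answer + (n//5)
--             break
--         n -= 3
--         answer += 1
--     if n < 0:
--         return -1
--     else:
--         return answer
-- ===== SOURCE B (Python) =====
-- def solution(n):
--     m = n // 5
--     while m >= 0:
--         r = n - 5 * m
--         if r % 3 == 0:
--             return m + r // 3
--         m -= 1
--     return -1
-- ===== Notes on version B (the rewrite author's own statement) =====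
-- stated objective: alternative
-- what changed: B searches the dual variable: it iterates the count of 5-boxes downward from n//5, returning at the first remainder divisible by 3, instead of A's upward subtraction of 3s until the remainder is divisible by 5.
import Mathlib
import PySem

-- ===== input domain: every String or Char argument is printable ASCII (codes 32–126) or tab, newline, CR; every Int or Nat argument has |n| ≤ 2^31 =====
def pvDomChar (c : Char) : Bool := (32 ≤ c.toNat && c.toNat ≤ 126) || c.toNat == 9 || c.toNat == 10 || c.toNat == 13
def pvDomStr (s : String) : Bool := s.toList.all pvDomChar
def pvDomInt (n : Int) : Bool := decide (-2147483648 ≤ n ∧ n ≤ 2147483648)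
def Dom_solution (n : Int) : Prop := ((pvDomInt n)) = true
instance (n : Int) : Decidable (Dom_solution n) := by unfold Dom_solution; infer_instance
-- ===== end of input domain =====

-- B searches the dual variable (count of 5-boxes, downward from n//5) instead of A's
-- upward subtraction of 3s; objective: alternative decomposition, same exact results.

-- ===== PORT A =====
-- while n>0: if n%5==0: answer += n//5; break; n -= 3; answer += 1
def solLoop (n answer : Int) : Int × Int :=
  if 0 < n then
    if PySem.Int.mod n 5 = 0 then (n, answer + PySem.Int.floordiv n 5)
    else solLoop (n - 3) (answer + 1)
  else (n, answer)
termination_by n.toNat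
decreasing_by omega

def solution (n : Int) : Int :=
  let p := solLoop n 0
  if p.1 < 0 then -1 else p.2

-- ===== PORT B =====
-- m = n//5; while m>=0: r = n-5*m; if r%3==0: return m + r//3; m -= 1; return -1
def altLoop (n m : Int) : Int :=
  if 0 ≤ m then
    if PySem.Int.mod (n - 5 * m) 3 = 0 then m + PySem.Int.floordiv (n - 5 * m) 3
    else altLoop n (m - 1)
  else -1
termination_by (m + 1).toNat
decreasing_by omega

def solution_alt (n : Int) : Int := altLoop n (PySem.Int.floordiv n 5)

-- ===== PRECONDITION & SPEC =====
def Spec_solution (n : Int) (out : Int) : Prop := out = solution_alt n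
instance (n : Int) (out : Int) : Decidable (Spec_solution n out) := by unfold Spec_solution; infer_instance

-- ===== CLAIM (what is proved, stated in full; the proofs are below) =====
def Claim_equal_solution : Prop := ∀ (n : Int), Dom_solution n → Spec_solution n (solution n)

-- ===== LEMMAS AND PROOFS =====

theorem pv_mod5 (a : Int) : PySem.Int.mod a 5 = a % 5 := PySem.Int.mod_eq_emod_of_pos (by norm_num)
theorem pv_mod3 (a : Int) : PySem.Int.mod a 3 = a % 3 := PySem.Int.mod_eq_emod_of_pos (by norm_num)
theorem pv_fd5 (a : Int) : PySem.Int.floordiv a 5 = a / 5 := PySem.Int.floordiv_eq_ediv_of_pos (by norm_num)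
theorem pv_fd3 (a : Int) : PySem.Int.floordiv a 3 = a / 3 := PySem.Int.floordiv_eq_ediv_of_pos (by norm_num)

theorem solLoop_step (n a : Int) (h : 0 < n) (h2 : n % 5 ≠ 0) :
    solLoop n a = solLoop (n - 3) (a + 1) := by
  rw [solLoop, if_pos h, if_neg (by rw [pv_mod5]; exact h2)]

theorem solLoop_done (n a : Int) (h : ¬ 0 < n) : solLoop n a = (n, a) := by
  rw [solLoop, if_neg h]

-- covers both the break (0 < n) and the exact exit at n = 0
theorem solLoop_fin (n a : Int) (h : 0 ≤ n) (h2 : n % 5 = 0) :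
    solLoop n a = (n, a + n / 5) := by
  rcases lt_or_eq_of_le h with hp | hz
  · rw [solLoop, if_pos hp, if_pos (by rw [pv_mod5]; exact h2), pv_fd5]
  · rw [solLoop, if_neg (by omega)]
    simp [← hz]

theorem altLoop_step (n m : Int) (h : 0 ≤ m) (h2 : (n - 5 * m) % 3 ≠ 0) :
    altLoop n m = altLoop n (m - 1) := by
  rw [altLoop, if_pos h, if_neg (by rw [pv_mod3]; exact h2)]

theorem altLoop_hit (n m : Int) (h : 0 ≤ m) (h2 : (n - 5 * m) % 3 = 0) :
    altLoop n m = m + (n - 5 * m) / 3 := by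
  rw [altLoop, if_pos h, if_pos (by rw [pv_mod3]; exact h2), pv_fd3]

theorem altLoop_neg (n m : Int) (h : m < 0) : altLoop n m = -1 := by
  rw [altLoop, if_neg (by omega)]

theorem A_neg (n : Int) (h : n < 0) : solution n = -1 := by
  simp only [solution, solLoop_done n 0 (by omega)]
  rw [if_pos (by exact h)]

theorem B_neg (n : Int) (h : n < 0) : solution_alt n = -1 := by
  rw [solution_alt, pv_fd5, altLoop_neg _ _ (by omega)]

theorem A_rec (n : Int) (h : 23 ≤ n) : solution n = solution (n - 15) + 3 := by
  simp only [solution]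
  have hr : n % 5 = 0 ∨ n % 5 = 1 ∨ n % 5 = 2 ∨ n % 5 = 3 ∨ n % 5 = 4 := by omega
  rcases hr with hr | hr | hr | hr | hr
  · rw [solLoop_fin _ _ (by omega) (by omega),
        solLoop_fin _ _ (by omega) (by omega)]
    simp only
    rw [if_neg (by omega), if_neg (by omega)]
    omega
  · rw [solLoop_step _ _ (by omega) (by omega), solLoop_step _ _ (by omega) (by omega),
        solLoop_fin _ _ (by omega) (by omega),
        solLoop_step _ _ (by omega) (by omega), solLoop_step _ _ (by omega) (by omega),
        solLoop_fin _ _ (by omega) (by omega)]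
    simp only
    rw [if_neg (by omega), if_neg (by omega)]
    omega
  · rw [solLoop_step _ _ (by omega) (by omega), solLoop_step _ _ (by omega) (by omega),
        solLoop_step _ _ (by omega) (by omega), solLoop_step _ _ (by omega) (by omega),
        solLoop_fin _ _ (by omega) (by omega),
        solLoop_step _ _ (by omega) (by omega), solLoop_step _ _ (by omega) (by omega),
        solLoop_step _ _ (by omega) (by omega), solLoop_step _ _ (by omega) (by omega),
        solLoop_fin _ _ (by omega) (by omega)]
    simp only
    rw [if_neg (by omega), if_neg (by omega)]
    omega
  · rw [solLoop_step _ _ (by omega) (by omega),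
        solLoop_fin _ _ (by omega) (by omega),
        solLoop_step _ _ (by omega) (by omega),
        solLoop_fin _ _ (by omega) (by omega)]
    simp only
    rw [if_neg (by omega), if_neg (by omega)]
    omega
  · rw [solLoop_step _ _ (by omega) (by omega), solLoop_step _ _ (by omega) (by omega),
        solLoop_step _ _ (by omega) (by omega),
        solLoop_fin _ _ (by omega) (by omega),
        solLoop_step _ _ (by omega) (by omega), solLoop_step _ _ (by omega) (by omega),
        solLoop_step _ _ (by omega) (by omega),
        solLoop_fin _ _ (by omega) (by omega)]
    simp only
    rw [if_neg (by omega), if_neg (by omega)]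
    omega

theorem B_rec (n : Int) (h : 23 ≤ n) : solution_alt n = solution_alt (n - 15) + 3 := by
  simp only [solution_alt, pv_fd5]
  have hr : n % 5 = 0 ∨ n % 5 = 1 ∨ n % 5 = 2 ∨ n % 5 = 3 ∨ n % 5 = 4 := by omega
  rcases hr with hr | hr | hr | hr | hr
  · rw [altLoop_hit _ _ (by omega) (by omega), altLoop_hit _ _ (by omega) (by omega)]
    omega
  · rw [altLoop_step _ _ (by omega) (by omega), altLoop_hit _ _ (by omega) (by omega),
        altLoop_step _ _ (by omega) (by omega), altLoop_hit _ _ (by omega) (by omega)]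
    omega
  · rw [altLoop_step _ _ (by omega) (by omega), altLoop_step _ _ (by omega) (by omega),
        altLoop_hit _ _ (by omega) (by omega),
        altLoop_step _ _ (by omega) (by omega), altLoop_step _ _ (by omega) (by omega),
        altLoop_hit _ _ (by omega) (by omega)]
    omega
  · rw [altLoop_hit _ _ (by omega) (by omega), altLoop_hit _ _ (by omega) (by omega)]
    omega
  · rw [altLoop_step _ _ (by omega) (by omega), altLoop_hit _ _ (by omega) (by omega),
        altLoop_step _ _ (by omega) (by omega), altLoop_hit _ _ (by omega) (by omega)]
    omega

set_option maxRecDepth 8000 in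
theorem main_bound : ∀ m : Nat, ∀ n : Int, 0 ≤ n → n < 23 + 15 * (m : Int) →
    solution n = solution_alt n := by
  intro m
  induction m with
  | zero =>
    intro n h0 h1
    norm_num at h1
    interval_cases n <;>
      simp [solution, solution_alt, solLoop_step, solLoop_fin, solLoop_done,
            altLoop_step, altLoop_hit, altLoop_neg]
  | succ k ih =>
    intro n h0 h1
    by_cases hc : n < 23 + 15 * (k : Int)
    · exact ih n h0 hc
    · have h23 : (23 : Int) ≤ n := by omega
      rw [A_rec n h23, B_rec n h23, ih (n - 15) (by omega) (by push_cast at h1 ⊢; omega)]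

-- ===== VERDICT (by name: the statement is the Claim_ definition above) =====
theorem solution_spec : Claim_equal_solution := by
  intro n _
  unfold Spec_solution
  by_cases hneg : n < 0
  · rw [A_neg n hneg, B_neg n hneg]
  · exact main_bound n.toNat n (by omega) (by omega)
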